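-- pv_equiv track=rewrite | github.com/Ashour158/Desk | core/apps/api/advanced_threat_detection.py | _should_block_request
-- ===== SOURCE A (Python) =====
-- from typing import Dict, List, Any, Optional, Tuple
--
-- def _should_block_request(threats: List[Dict]) -> bool:
--     """Determine if request should be blocked."""
--     if not threats:
--         return False
--
--     # Block if any critical threats
--     for threat in threats:
--         if threat.get('severity') == 'critical':
--             return True
--
--     # Block if too many high-severity threats
--     high_severity_count = sum(1 for threat in threats if threat.get('severity') == 'high')
--     if high_severity_count > 2:
--         return True
--
--     return False
-- ===== SOURCE B (Python) =====
-- def _should_block_request(threats):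
--     """Determine if request should be blocked.
--
--     Single fused short-circuiting pass: stop at the first 'critical'
--     threat or at the third 'high' threat, instead of A's staged passes
--     (full scan for critical, then a full count of highs)."""
--     highs = 0
--     for threat in threats:
--         s = threat.get('severity')
--         if s == 'critical':
--             return True
--         if s == 'high':
--             highs += 1
--             if highs > 2:
--                 return True
--     return False
-- ===== Notes on version B (the rewrite author's own statement) =====
-- stated objective: alternative
-- what changed: Replaces A's staged passes (full early-return scan for 'critical', then a second full pass summing 'high' threats) with one fused short-circuiting pass carrying a high-count accumulator that returns True immediately at the first critical or the third high threat, never completing the count.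
import Mathlib
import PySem

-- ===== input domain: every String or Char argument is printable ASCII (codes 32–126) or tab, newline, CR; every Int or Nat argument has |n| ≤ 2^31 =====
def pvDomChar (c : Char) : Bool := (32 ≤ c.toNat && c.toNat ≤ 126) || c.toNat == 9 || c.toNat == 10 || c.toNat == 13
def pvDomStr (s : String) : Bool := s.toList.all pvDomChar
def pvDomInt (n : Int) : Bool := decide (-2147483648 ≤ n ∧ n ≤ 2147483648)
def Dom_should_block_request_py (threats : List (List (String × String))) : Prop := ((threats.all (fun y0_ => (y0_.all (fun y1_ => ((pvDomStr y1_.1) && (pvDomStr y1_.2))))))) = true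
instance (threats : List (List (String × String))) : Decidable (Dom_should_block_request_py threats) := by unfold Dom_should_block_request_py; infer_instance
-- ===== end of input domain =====

-- B fuses A's two staged passes into one short-circuiting pass with a high-count accumulator; objective: alternative decomposition (not faster).
-- ===== PORT A =====
def sevOf (t : List (String × String)) : Option String := (PySem.Dict.mk t).get? "severity"

def critScan : List (List (String × String)) → Bool
  | [] => false
  | t :: rest => if sevOf t == some "critical" then true else critScan rest

def should_block_request_py (threats : List (List (String × String))) : Bool :=
  if threats.isEmpty then false
  else if critScan threats then true
  else
    let high_severity_count : Int :=
      threats.foldl (fun acc t => if sevOf t == some "high" then acc + 1 else acc) 0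
    if high_severity_count > 2 then true else false

-- ===== PORT B =====
def altGo : List (List (String × String)) → Int → Bool
  | [], _ => false
  | t :: rest, highs =>
    let s := sevOf t
    if s == some "critical" then true
    else if s == some "high" then
      if highs + 1 > 2 then true else altGo rest (highs + 1)
    else altGo rest highs

def should_block_request_py_alt (threats : List (List (String × String))) : Bool :=
  altGo threats 0

-- ===== PRECONDITION & SPEC =====
def Spec_should_block_request_py (threats : List (List (String × String))) (out : Bool) : Prop := out = should_block_request_py_alt threats
instance (threats : List (List (String × String))) (out : Bool) : Decidable (Spec_should_block_request_py threats out) := by unfold Spec_should_block_request_py; infer_instance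

-- ===== CLAIM (what is proved, stated in full; the proofs are below) =====
def Claim_equal_should_block_request_py : Prop := ∀ (threats : List (List (String × String))), Dom_should_block_request_py threats → Spec_should_block_request_py threats (should_block_request_py threats)

-- ===== LEMMAS AND PROOFS =====
theorem critScan_eq (ts : List (List (String × String))) :
    critScan ts = ts.any (fun t => sevOf t == some "critical") := by
  induction ts with
  | nil => rfl
  | cons t rest ih => by_cases h : sevOf t = some "critical" <;> simp [critScan, ih, h]

theorem high_foldl_eq (ts : List (List (String × String))) (acc : Int) :
    ts.foldl (fun acc t => if sevOf t == some "high" then acc + 1 else acc) acc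
      = acc + ((ts.map sevOf).count (some "high") : Int) := by
  induction ts generalizing acc with
  | nil => simp
  | cons t rest ih =>
    simp only [List.foldl_cons, List.map_cons, List.count_cons, ih]
    split_ifs with h
    · simp; ring
    · simp

theorem altGo_eq (ts : List (List (String × String))) (h : Int) (hh : 0 ≤ h ∧ h ≤ 2) :
    altGo ts h
      = ((ts.any (fun t => sevOf t == some "critical"))
          || decide (h + ((ts.map sevOf).count (some "high") : Int) > 2)) := by
  induction ts generalizing h with
  | nil => simp [altGo]; omega
  | cons t rest ih =>
    by_cases hc : sevOf t = some "critical"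
    · simp [altGo, hc]
    · by_cases hhi : sevOf t = some "high"
      · simp only [altGo, hc, hhi, beq_iff_eq, if_true, if_false, List.any_cons,
          List.map_cons, List.count_cons]
        have hcnt : (0:Int) ≤ ((rest.map sevOf).count (some "high") : Int) := Int.natCast_nonneg _
        by_cases hb : h + 1 > 2
        · rw [if_pos hb]
          simp [hhi, hc]
          right; omega
        · rw [if_neg hb, ih (h+1) ⟨by omega, by omega⟩]
          have heq : h + (((rest.map sevOf).count (some "high") : Int) + 1)
              = h + 1 + ((rest.map sevOf).count (some "high") : Int) := by ring
          simp [hhi, hc]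
          rw [heq]
      · simp only [altGo, beq_iff_eq, hc, hhi, if_false, ih h hh, List.any_cons,
          List.map_cons, List.count_cons]
        simp [hc, hhi, Bool.or_assoc]

-- ===== VERDICT (by name: the statement is the Claim_ definition above) =====
theorem should_block_request_py_spec : Claim_equal_should_block_request_py := by
  intro threats _
  unfold Spec_should_block_request_py should_block_request_py should_block_request_py_alt
  rw [altGo_eq threats 0 ⟨le_rfl, by norm_num⟩, critScan_eq]
  cases threats with
  | nil => simp
  | cons t rest =>
    simp only [List.isEmpty_cons, if_false, Bool.false_eq_true, high_foldl_eq, zero_add]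
    by_cases hany : ((t :: rest).any fun x => sevOf x == some "critical") = true
    · simp [hany]
    · rw [Bool.not_eq_true] at hany
      simp only [hany, if_false, Bool.false_or]
      by_cases hh : (2:Int) < (((t :: rest).map sevOf).count (some "high") : Int)
      · simp [hh]
      · simp [hh]
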